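-- pv_equiv track=rewrite | github.com/Meyenhofer/pattern-recognition-2016 | ip/features.py | transitions
-- ===== SOURCE A (Python) =====
-- def transitions(bin_img):
--     """
--     Returns the number of black to white and white to black transitions.
--     The two numbers will only be different when the image does not end in the
--     same colour as it started.
--     """
--     black_white_count = 0
--     white_black_count = 0
--     current_state = bin_img[0][0]
--     for lis in bin_img:
--         for val in lis:
--             if val is not current_state:
--                 current_state = val
--                 if val:
--                     black_white_count += 1
--                 else:
--                     white_black_count += 1
--
--     return black_white_count, white_black_count
-- ===== SOURCE B (Python) =====
-- def transitions(bin_img):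
--     # Stage 1: flatten; Stage 2: run-length decomposition by skipping equal
--     # blocks; Stage 3: count the colours of every run after the first, since
--     # each later run contributes exactly one transition into its own colour.
--     flat = [v for row in bin_img for v in row]
--     runs = []
--     i = 0
--     n = len(flat)
--     while i < n:
--         runs.append(flat[i])
--         j = i + 1
--         while j < n and flat[j] is flat[i]:
--             j += 1
--         i = j
--     tail = runs[1:]
--     return sum(1 for k in tail if k), sum(1 for k in tail if not k)
-- ===== Notes on version B (the rewrite author's own statement) =====
-- stated objective: alternative
-- what changed: Replaces A's per-pixel state machine with a three-stage pipeline: flatten, run-length decomposition by skipping maximal equal blocks with index jumps, then two counting passes over the colours of the runs after the first; Pre_ excludes inputs where A raises IndexError on bin_img[0][0] (empty image or empty first row).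
import Mathlib
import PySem

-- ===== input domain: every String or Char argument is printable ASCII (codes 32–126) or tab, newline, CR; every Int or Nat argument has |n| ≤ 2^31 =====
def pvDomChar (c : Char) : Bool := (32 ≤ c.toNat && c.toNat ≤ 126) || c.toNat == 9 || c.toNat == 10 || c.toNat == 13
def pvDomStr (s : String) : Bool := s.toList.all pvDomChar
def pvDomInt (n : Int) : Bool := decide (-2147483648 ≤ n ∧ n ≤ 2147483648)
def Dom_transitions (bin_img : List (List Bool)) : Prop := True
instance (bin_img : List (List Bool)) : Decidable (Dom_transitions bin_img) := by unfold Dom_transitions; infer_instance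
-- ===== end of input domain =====

-- B replaces A's per-pixel state machine with run-length decomposition (skip maximal
-- equal blocks) followed by counting run colours after the first (objective: alternative).

-- ===== PORT A =====
-- A's loop step: compare val to current_state, update counters and state.
def pvStepA (st : Int × Int × Bool) (val : Bool) : Int × Int × Bool :=
  if val ≠ st.2.2 then
    if val then (st.1 + 1, st.2.1, val) else (st.1, st.2.1 + 1, val)
  else st

def transitions (bin_img : List (List Bool)) : Int × Int :=
  -- bin_img[0][0]: none = IndexError (excluded by Pre_transitions); junk value (0,0) there
  match (PySem.List.pyGet? bin_img 0).bind (fun r => PySem.List.pyGet? r 0) with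
  | none => (0, 0)
  | some s0 =>
    ((bin_img.foldl (fun st lis => lis.foldl pvStepA st) (0, 0, s0)).1,
     (bin_img.foldl (fun st lis => lis.foldl pvStepA st) (0, 0, s0)).2.1)

-- ===== PORT B =====
-- B's inner while loop skips the maximal block equal to the run head (dropWhile);
-- the outer while loop appends one run head per block.
def pvSkipRuns (cur : Bool) : List Bool → List Bool
  | [] => []
  | y :: ys => if y == cur then pvSkipRuns cur ys else y :: pvSkipRuns y ys

def pvRuns : List Bool → List Bool
  | [] => []
  | x :: xs => x :: pvSkipRuns x xs

def transitions_alt (bin_img : List (List Bool)) : Int × Int :=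
  let tail := (pvRuns (bin_img.flatMap id)).tail   -- runs[1:]
  ((tail.countP id : Int), (tail.countP (fun k => !k) : Int))

-- ===== PRECONDITION & SPEC =====
-- Pre_ excludes exactly the inputs where A raises IndexError on bin_img[0][0]:
-- the empty image and images whose first row is empty.
def Pre_transitions (bin_img : List (List Bool)) : Prop :=
  bin_img ≠ [] ∧ bin_img.head? ≠ some []
instance (bin_img : List (List Bool)) : Decidable (Pre_transitions bin_img) := by unfold Pre_transitions; infer_instance

def pvWitness_transitions : List (List Bool) := [[true, false], [false, true]]

def Spec_transitions (bin_img : List (List Bool)) (out : Int × Int) : Prop := out = transitions_alt bin_img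
instance (bin_img : List (List Bool)) (out : Int × Int) : Decidable (Spec_transitions bin_img out) := by unfold Spec_transitions; infer_instance

-- ===== CLAIM (what is proved, stated in full; the proofs are below) =====
def Claim_equal_transitions : Prop := ∀ (bin_img : List (List Bool)), Dom_transitions bin_img → Pre_transitions bin_img → Spec_transitions bin_img (transitions bin_img)

-- ===== LEMMAS AND PROOFS =====

-- A's nested fold over the rows is the fold over the flattened pixel list.
theorem foldl_rows_eq_flat (bin_img : List (List Bool)) (st : Int × Int × Bool) :
    bin_img.foldl (fun st lis => lis.foldl pvStepA st) st
      = (bin_img.flatMap id).foldl pvStepA st := by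
  induction bin_img generalizing st with
  | nil => rfl
  | cons r t ih => simp [List.flatMap_cons, List.foldl_append, ih]

-- A's state machine over l starting at cur computes the colour counts of the
-- run heads pvSkipRuns extracts from l.
theorem stepA_eq_runs (l : List Bool) :
    ∀ (cur : Bool) (bw wb : Int),
      (l.foldl pvStepA (bw, wb, cur)).1 = bw + ((pvSkipRuns cur l).countP id : Int) ∧
      (l.foldl pvStepA (bw, wb, cur)).2.1 = wb + ((pvSkipRuns cur l).countP (fun k => !k) : Int) := by
  induction l with
  | nil => intro cur bw wb; simp [pvSkipRuns]
  | cons v t ih =>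
    intro cur bw wb
    by_cases h : v = cur
    · subst h
      simpa [pvStepA, pvSkipRuns] using ih v bw wb
    · have hskip : pvSkipRuns cur (v :: t) = v :: pvSkipRuns v t := by
        simp [pvSkipRuns, h]
      rw [List.foldl_cons, hskip]
      cases v with
      | true =>
        have hstep : pvStepA (bw, wb, cur) true = (bw + 1, wb, true) := by
          simp [pvStepA, h]
        rw [hstep]
        have h1 := ih true (bw + 1) wb
        exact ⟨by rw [h1.1, List.countP_cons]; simp <;> omega,
               by rw [h1.2, List.countP_cons]; simp <;> omega⟩
      | false =>
        have hstep : pvStepA (bw, wb, cur) false = (bw, wb + 1, false) := by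
          simp [pvStepA, h]
        rw [hstep]
        have h1 := ih false bw (wb + 1)
        exact ⟨by rw [h1.1, List.countP_cons]; simp <;> omega,
               by rw [h1.2, List.countP_cons]; simp <;> omega⟩

-- ===== VERDICT (by name: the statement is the Claim_ definition above) =====
theorem transitions_spec : Claim_equal_transitions := by
  intro bin_img _ hpre
  rcases bin_img with _ | ⟨_ | ⟨v, r⟩, t⟩
  · exact absurd rfl hpre.1
  · exact (hpre.2 rfl).elim
  · unfold Spec_transitions transitions transitions_alt
    rw [PySem.List.pyGet?_zero_cons, Option.bind_some, PySem.List.pyGet?_zero_cons]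
    have hflat : (((v :: r) :: t).flatMap id) = v :: (r ++ t.flatMap id) := by
      simp [List.flatMap_cons]
    have h := stepA_eq_runs (r ++ t.flatMap id) v 0 0
    have hstep : pvStepA ((0 : Int), (0 : Int), v) v = ((0 : Int), (0 : Int), v) := by
      simp [pvStepA]
    show ((((v :: r) :: t).foldl (fun st lis => lis.foldl pvStepA st) ((0 : Int), (0 : Int), v)).1,
          (((v :: r) :: t).foldl (fun st lis => lis.foldl pvStepA st) ((0 : Int), (0 : Int), v)).2.1)
        = _
    rw [foldl_rows_eq_flat, hflat]
    simp only [List.foldl_cons, hstep]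
    have h1 := h.1
    have h2 := h.2
    simp only [List.flatMap_id, List.foldl_append, zero_add] at h1 h2
    refine Prod.ext ?_ ?_ <;> simp [pvRuns, hflat, List.foldl_append, h1, h2]
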